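-- pv_equiv track=rewrite | github.com/Vindalamar/stat_rep | task5/task5.py | lesser
-- ===== SOURCE A (Python) =====
-- def lesser(x1, x2, js):
--     if x1 == x2:
--         return False
--     for c in js:
--         if x1 in c and x2 in c:
--             return False
--         if x1 in c:
--             return True
--         if x2 in c:
--             return False
-- ===== SOURCE B (Python) =====
-- def lesser(x1, x2, js):
--     if x1 == x2:
--         return False
--     i1 = next((i for i, c in enumerate(js) if x1 in c), None)
--     i2 = next((i for i, c in enumerate(js) if x2 in c), None)
--     if i1 is None and i2 is None:
--         return None
--     if i1 is None:
--         return False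
--     return i2 is None or i1 < i2
-- ===== Notes on version B (the rewrite author's own statement) =====
-- stated objective: alternative
-- what changed: Replaces the interleaved early-return scan by two independent first-occurrence-index scans and derives the answer from comparing the two indices.
import Mathlib
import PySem

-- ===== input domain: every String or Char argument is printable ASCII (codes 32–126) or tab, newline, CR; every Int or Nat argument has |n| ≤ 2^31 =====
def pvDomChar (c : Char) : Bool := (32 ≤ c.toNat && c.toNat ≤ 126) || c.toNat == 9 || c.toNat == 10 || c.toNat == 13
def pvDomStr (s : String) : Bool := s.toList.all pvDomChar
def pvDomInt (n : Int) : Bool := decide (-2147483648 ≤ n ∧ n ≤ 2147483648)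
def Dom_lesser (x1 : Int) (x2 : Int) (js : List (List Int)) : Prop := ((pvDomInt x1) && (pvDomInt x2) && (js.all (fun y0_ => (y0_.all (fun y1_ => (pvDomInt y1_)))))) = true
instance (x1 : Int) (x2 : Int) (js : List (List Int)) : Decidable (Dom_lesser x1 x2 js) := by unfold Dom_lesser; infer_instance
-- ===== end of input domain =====

-- B derives the answer from two first-occurrence-index scans instead of A's single interleaved early-return pass (alternative decomposition, same cost).


-- ===== PORT A =====
-- the for-loop of A, returning none when it falls off the end
def lesserLoop (x1 : Int) (x2 : Int) : List (List Int) → Option Bool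
  | [] => none
  | c :: rest =>
    if x1 ∈ c ∧ x2 ∈ c then some false
    else if x1 ∈ c then some true
    else if x2 ∈ c then some false
    else lesserLoop x1 x2 rest

def lesser (x1 : Int) (x2 : Int) (js : List (List Int)) : Option Bool :=
  if x1 = x2 then some false else lesserLoop x1 x2 js

-- ===== PORT B =====
-- index of the first group containing x (the `next(... enumerate ...)` scan)
def firstIdx (x : Int) : List (List Int) → Option Nat
  | [] => none
  | c :: rest => if x ∈ c then some 0 else (firstIdx x rest).map (· + 1)

def lesser_alt (x1 : Int) (x2 : Int) (js : List (List Int)) : Option Bool :=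
  if x1 = x2 then some false
  else
    match firstIdx x1 js, firstIdx x2 js with
    | none, none => none
    | none, some _ => some false
    | some _, none => some true
    | some i1, some i2 => some (decide (i1 < i2))

-- ===== PRECONDITION & SPEC =====
def Spec_lesser (x1 : Int) (x2 : Int) (js : List (List Int)) (out : Option Bool) : Prop := out = lesser_alt x1 x2 js
instance (x1 : Int) (x2 : Int) (js : List (List Int)) (out : Option Bool) : Decidable (Spec_lesser x1 x2 js out) := by unfold Spec_lesser; infer_instance

-- ===== CLAIM (what is proved, stated in full; the proofs are below) =====
def Claim_equal_lesser : Prop := ∀ (x1 : Int) (x2 : Int) (js : List (List Int)), Dom_lesser x1 x2 js → Spec_lesser x1 x2 js (lesser x1 x2 js)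

-- ===== LEMMAS AND PROOFS =====
theorem lesserLoop_eq (x1 x2 : Int) (js : List (List Int)) :
    lesserLoop x1 x2 js =
      (match firstIdx x1 js, firstIdx x2 js with
       | none, none => none
       | none, some _ => some false
       | some _, none => some true
       | some i1, some i2 => some (decide (i1 < i2))) := by
  induction js with
  | nil => rfl
  | cons c rest ih =>
    by_cases h1 : x1 ∈ c <;> by_cases h2 : x2 ∈ c <;>
      simp [lesserLoop, firstIdx, h1, h2, ih] <;>
      cases firstIdx x1 rest <;> cases firstIdx x2 rest <;> simp

-- ===== VERDICT (by name: the statement is the Claim_ definition above) =====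
theorem lesser_spec : Claim_equal_lesser := by
  intro x1 x2 js _
  unfold Spec_lesser lesser lesser_alt
  by_cases h : x1 = x2 <;> simp [h, lesserLoop_eq]
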